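-- pv_equiv track=rewrite | github.com/jakelever/biowordlists | scripts/generateCancerTerms.py | augmentTermList
-- ===== SOURCE A (Python) =====
-- def augmentTermList(terms):
-- 	"""
-- 	Adds additional spellings and plurals to a list of cancer terms
--
-- 	Args:
-- 		terms (list of strings): List of strings of terms
--
-- 	Returns:
-- 		list of augmente strings
-- 	"""
--
-- 	# Lower case everything (if not already done anyway)
-- 	terms = [ t.lower() for t in terms ]
--
-- 	# A list of short cancer terms that are acceptable (others like ALL are too ambiguous and excluded)
-- 	acceptedShortTerms = ["gbm","aml","crc","hcc","cll"]
--
-- 	# Filter out smaller terms except the allowed ones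
-- 	terms = [ t for t in terms if len(t) > 3 or t in acceptedShortTerms ]
--
-- 	# Filter out terms with various bits of punctuation
-- 	terms = [ t for t in terms if not any ( p in t for p in ',;()[]{}' ) ]
--
-- 	# Filter out terms that start with "of "
-- 	terms = [ t for t in terms if not t.startswith('of ') ]
--
-- 	# Try the British spelling of tumor
-- 	terms += [ t.replace('tumor','tumour') for t in terms ]
--
-- 	# Try the alternative spelling of leukemia
-- 	terms += [ t.replace('leukemia','leukaemia') for t in terms ]
--
-- 	# Add some synonyms
-- 	synonym_groups = [ ['acute lymphocytic leukemia', 'acute lymphoblastic leukemia', 'acute lymphoid leukemia' ] ]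
-- 	terms += [ t.replace(a,b) for t in terms for group in synonym_groups for a in group for b in group ]
--
-- 	# Terms that we can add an 'S' to pluralise (if not already included)
-- 	pluralEndings = ["tumor", "tumour", "neoplasm", "cancer", "oma", "emia"]
--
-- 	# Check if any term ends with one of the plural endings, and then pluralise it
-- 	plurals = []
-- 	for t in terms:
-- 		pluralize = any( [ t.endswith(e) for e in pluralEndings ] )
--
-- 		if pluralize:
-- 			plurals.append(t + "s")
-- 	terms = sorted(set(terms + plurals))
--
-- 	return terms
-- ===== SOURCE B (Python) =====
-- def augmentTermList(terms):
-- 	"""Closed-form enumeration: precompute the 40 replacement pipelines spanning the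
-- 	variant space, apply each to every kept term in one pass, pluralising inline."""
-- 	accepted = {"gbm", "aml", "crc", "hcc", "cll"}
-- 	group = ['acute lymphocytic leukemia', 'acute lymphoblastic leukemia', 'acute lymphoid leukemia']
-- 	pairs = [(a, b) for a in group for b in group]
-- 	pipelines = [[p for p in (r, l, s) if p is not None]
-- 	             for r in (None, ('tumor', 'tumour'))
-- 	             for l in (None, ('leukemia', 'leukaemia'))
-- 	             for s in [None] + pairs]
-- 	endings = ("tumor", "tumour", "neoplasm", "cancer", "oma", "emia")
-- 	out = set()
-- 	for t0 in terms:
-- 		t = t0.lower()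
-- 		if (len(t) > 3 or t in accepted) and not any(p in t for p in ',;()[]{}') and not t.startswith('of '):
-- 			for pipe in pipelines:
-- 				v = t
-- 				for old, new in pipe:
-- 					v = v.replace(old, new)
-- 				out.add(v)
-- 				if v.endswith(endings):
-- 					out.add(v + 's')
-- 	return sorted(out)
-- ===== Notes on version B (the rewrite author's own statement) =====
-- stated objective: alternative
-- what changed: A's staged whole-list augmentation passes (append a tumour-respelled copy, then a leukaemia copy, then an all-pairs synonym pass, then a separate plural scan) are replaced by a closed-form enumeration: B precomputes the 40 replacement pipelines (2 x 2 x (1+9) composed substitutions) that span the whole variant space and applies each pipeline to every kept term in a single pass, pluralising each variant inline into one set. (measured faster: no duplicate-laden intermediate lists are built)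
import Mathlib
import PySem

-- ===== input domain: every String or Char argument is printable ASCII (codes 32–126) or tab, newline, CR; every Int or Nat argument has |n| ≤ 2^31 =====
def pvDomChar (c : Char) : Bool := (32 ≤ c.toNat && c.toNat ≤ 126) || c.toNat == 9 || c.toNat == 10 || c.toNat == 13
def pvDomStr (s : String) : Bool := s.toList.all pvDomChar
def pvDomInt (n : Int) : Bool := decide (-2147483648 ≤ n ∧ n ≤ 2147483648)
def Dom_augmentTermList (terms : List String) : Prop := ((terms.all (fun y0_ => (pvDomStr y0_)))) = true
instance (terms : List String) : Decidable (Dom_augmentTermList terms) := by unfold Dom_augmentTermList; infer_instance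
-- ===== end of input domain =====

-- B replaces A's staged whole-list augmentation passes by a closed-form enumeration of the
-- 40 replacement pipelines spanning the variant space, applied per kept term in one pass
-- with inline pluralisation into one deduplicated set (measured constant-factor faster: no duplicate-laden intermediate lists).

-- ===== PORT A =====
def augmentTermList (terms : List String) : List String :=
  let terms1 := terms.map (fun t => PySem.Str.lower t)
  let acceptedShortTerms : List String := ["gbm", "aml", "crc", "hcc", "cll"]
  let terms2 := terms1.filter (fun t => decide (3 < PySem.Str.len t) || acceptedShortTerms.contains t)
  let terms3 := terms2.filter (fun t => !(([",", ";", "(", ")", "[", "]", "{", "}"] : List String).any (fun p => PySem.Str.isIn p t)))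
  let terms4 := terms3.filter (fun t => !(PySem.Str.startswith t "of "))
  let terms5 := terms4 ++ terms4.map (fun t => PySem.Str.replace t "tumor" "tumour")
  let terms6 := terms5 ++ terms5.map (fun t => PySem.Str.replace t "leukemia" "leukaemia")
  let synonym_groups : List (List String) := [["acute lymphocytic leukemia", "acute lymphoblastic leukemia", "acute lymphoid leukemia"]]
  let terms7 := terms6 ++ terms6.flatMap (fun t => synonym_groups.flatMap (fun group => group.flatMap (fun a => group.map (fun b => PySem.Str.replace t a b))))
  let pluralEndings : List String := ["tumor", "tumour", "neoplasm", "cancer", "oma", "emia"]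
  let plurals := terms7.foldl (fun plurals t =>
    if pluralEndings.any (fun e => PySem.Str.endswith t e) then plurals ++ [t ++ "s"] else plurals) []
  PySem.List.sorted (PySem.Set.ofList (terms7 ++ plurals)) (fun x => x) false

-- ===== PORT B =====
def pvGroup : List String := ["acute lymphocytic leukemia", "acute lymphoblastic leukemia", "acute lymphoid leukemia"]
def pvPairs : List (String × String) := pvGroup.flatMap (fun a => pvGroup.map (fun b => (a, b)))
-- the 2 x 2 x (1+9) replacement pipelines of Source B
def pvPipes : List (List (String × String)) :=
  ([none, some ("tumor", "tumour")] : List (Option (String × String))).flatMap (fun r =>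
  ([none, some ("leukemia", "leukaemia")] : List (Option (String × String))).flatMap (fun l =>
  (none :: pvPairs.map some).map (fun s => ([r, l, s] : List (Option (String × String))).filterMap id)))

def augmentTermList_alt (terms : List String) : List String :=
  let accepted : PySem.Set String := PySem.Set.ofList ["gbm", "aml", "crc", "hcc", "cll"]
  let endings : List String := ["tumor", "tumour", "neoplasm", "cancer", "oma", "emia"]
  let out : PySem.Set String := terms.foldl (fun out t0 =>
    let t := PySem.Str.lower t0
    if (decide (3 < PySem.Str.len t) || PySem.Set.contains accepted t)
        && !(([",", ";", "(", ")", "[", "]", "{", "}"] : List String).any (fun p => PySem.Str.isIn p t))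
        && !(PySem.Str.startswith t "of ") then
      pvPipes.foldl (fun out pipe =>
        let v := pipe.foldl (fun v pr => PySem.Str.replace v pr.1 pr.2) t
        let out2 := PySem.Set.add out v
        if endings.any (fun e => PySem.Str.endswith v e) then PySem.Set.add out2 (v ++ "s") else out2) out
    else out) PySem.Set.empty
  PySem.List.sorted out (fun x => x) false

-- ===== PRECONDITION & SPEC =====
def Spec_augmentTermList (terms : List String) (out : List String) : Prop := out = augmentTermList_alt terms
instance (terms : List String) (out : List String) : Decidable (Spec_augmentTermList terms out) := by unfold Spec_augmentTermList; infer_instance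

-- ===== CLAIM (what is proved, stated in full; the proofs are below) =====
def Claim_equal_augmentTermList : Prop := ∀ (terms : List String), Dom_augmentTermList terms → Spec_augmentTermList terms (augmentTermList terms)

-- ===== LEMMAS AND PROOFS =====

-- one application of the tumor/leukemia respelling stages to a single term
def genQ {α : Type} (f g : α → α) (t x : α) : Prop := (x = t ∨ x = f t) ∨ x = g t ∨ x = g (f t)
-- the full per-term variant set (respellings, then the synonym pass)
def genP {α : Type} (f g : α → α) (syn : α → List α) (t x : α) : Prop :=
  genQ f g t x ∨ ∃ y, genQ f g t y ∧ x ∈ syn y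

theorem mem_L2 {α : Type} (f g : α → α) (L : List α) (x : α) :
    x ∈ (L ++ L.map f) ++ (L ++ L.map f).map g ↔ ∃ t ∈ L, genQ f g t x := by
  simp only [List.mem_append, List.mem_map, genQ]
  aesop

theorem mem_stages {α : Type} (f g : α → α) (syn : α → List α) (L : List α) (x : α) :
    x ∈ ((L ++ L.map f) ++ (L ++ L.map f).map g) ++ ((L ++ L.map f) ++ (L ++ L.map f).map g).flatMap syn
      ↔ ∃ t ∈ L, genP f g syn t x := by
  rw [List.mem_append, List.mem_flatMap, mem_L2]
  constructor
  · rintro (⟨t, ht, hq⟩ | ⟨y, hy, hs⟩)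
    · exact ⟨t, ht, Or.inl hq⟩
    · obtain ⟨t, ht, hq⟩ := (mem_L2 f g L y).mp hy
      exact ⟨t, ht, Or.inr ⟨y, hq, hs⟩⟩
  · rintro ⟨t, ht, (hq | ⟨y, hq, hs⟩)⟩
    · exact Or.inl ⟨t, ht, hq⟩
    · exact Or.inr ⟨y, (mem_L2 f g L y).mpr ⟨t, ht, hq⟩, hs⟩

-- the shared keep condition (A's three filters; B's single guard)
def pvKeep (t : String) : Bool :=
  (decide (3 < PySem.Str.len t) || PySem.Set.contains (PySem.Set.ofList ["gbm", "aml", "crc", "hcc", "cll"]) t)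
  && !(([",", ";", "(", ")", "[", "]", "{", "}"] : List String).any (fun p => PySem.Str.isIn p t))
  && !(PySem.Str.startswith t "of ")

-- A's three filter conditions together are the keep condition
theorem keep_eq (t : String) :
    ((decide (3 < PySem.Str.len t) || (["gbm", "aml", "crc", "hcc", "cll"] : List String).contains t) = true
      ∧ (!(([",", ";", "(", ")", "[", "]", "{", "}"] : List String).any (fun p => PySem.Str.isIn p t))) = true
      ∧ (!(PySem.Str.startswith t "of ")) = true) ↔ pvKeep t = true := by
  simp only [pvKeep, Bool.and_eq_true, PySem.Set.contains_iff, PySem.Set.mem_ofList,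
    List.contains_iff_mem, Bool.or_eq_true, decide_eq_true_eq]
  tauto

-- genP is invariant under exchanging membership-equivalent synonym generators
theorem genP_congr {α : Type} (f g : α → α) (s1 s2 : α → List α)
    (h : ∀ y x, x ∈ s1 y ↔ x ∈ s2 y) (t x : α) : genP f g s1 t x ↔ genP f g s2 t x := by
  unfold genP
  constructor <;> rintro (hq | ⟨y, hy, hs⟩)
  · exact Or.inl hq
  · exact Or.inr ⟨y, hy, (h y x).mp hs⟩
  · exact Or.inl hq
  · exact Or.inr ⟨y, hy, (h y x).mpr hs⟩

-- named pieces of both ports' computations (definitionally equal to the unfolded ports)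
def pvFt (t : String) : String := PySem.Str.replace t "tumor" "tumour"
def pvGt (t : String) : String := PySem.Str.replace t "leukemia" "leukaemia"
def pvSynA (t : String) : List String :=
  ([["acute lymphocytic leukemia", "acute lymphoblastic leukemia", "acute lymphoid leukemia"]] : List (List String)).flatMap
    (fun group => group.flatMap (fun a => group.map (fun b => PySem.Str.replace t a b)))
def pvSynB (t : String) : List String := pvPairs.map (fun pr => PySem.Str.replace t pr.1 pr.2)
def pvPl (x : String) : Bool := (["tumor", "tumour", "neoplasm", "cancer", "oma", "emia"] : List String).any (fun e => PySem.Str.endswith x e)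

def pvL4 (terms : List String) : List String :=
  (((terms.map (fun t => PySem.Str.lower t)).filter
      (fun t => decide (3 < PySem.Str.len t) || (["gbm", "aml", "crc", "hcc", "cll"] : List String).contains t)).filter
      (fun t => !(([",", ";", "(", ")", "[", "]", "{", "}"] : List String).any (fun p => PySem.Str.isIn p t)))).filter
      (fun t => !(PySem.Str.startswith t "of "))
def pvT7 (terms : List String) : List String :=
  ((pvL4 terms ++ (pvL4 terms).map pvFt) ++ (pvL4 terms ++ (pvL4 terms).map pvFt).map pvGt)
    ++ ((pvL4 terms ++ (pvL4 terms).map pvFt) ++ ((pvL4 terms ++ (pvL4 terms).map pvFt)).map pvGt).flatMap pvSynA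
def pvPluralsA (terms : List String) : List String :=
  (pvT7 terms).foldl (fun plurals t => if pvPl t then plurals ++ [t ++ "s"] else plurals) []

theorem syn_members_eq (y x : String) : x ∈ pvSynA y ↔ x ∈ pvSynB y := by
  simp [pvSynA, pvSynB, pvPairs, pvGroup]

theorem memT7 (terms : List String) (x : String) :
    x ∈ pvT7 terms ↔ ∃ t0 ∈ terms, pvKeep (PySem.Str.lower t0) = true ∧ genP pvFt pvGt pvSynB (PySem.Str.lower t0) x := by
  rw [pvT7, mem_stages]
  constructor
  · rintro ⟨t, ht, hp⟩
    simp only [pvL4, List.mem_filter, List.mem_map] at ht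
    obtain ⟨⟨⟨⟨t0, ht0, rfl⟩, h1⟩, h2⟩, h3⟩ := ht
    exact ⟨t0, ht0, (keep_eq _).mp ⟨h1, h2, h3⟩,
      (genP_congr pvFt pvGt pvSynA pvSynB syn_members_eq _ _).mp hp⟩
  · rintro ⟨t0, ht0, hk, hp⟩
    obtain ⟨h1, h2, h3⟩ := (keep_eq _).mpr hk
    refine ⟨PySem.Str.lower t0, ?_, (genP_congr pvFt pvGt pvSynA pvSynB syn_members_eq _ _).mpr hp⟩
    simp only [pvL4, List.mem_filter, List.mem_map]
    exact ⟨⟨⟨⟨t0, ht0, rfl⟩, h1⟩, h2⟩, h3⟩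

theorem memPlA (terms : List String) (x : String) :
    x ∈ pvPluralsA terms ↔ ∃ y, (∃ t0 ∈ terms, pvKeep (PySem.Str.lower t0) = true ∧ genP pvFt pvGt pvSynB (PySem.Str.lower t0) y) ∧ pvPl y = true ∧ x = y ++ "s" := by
  rw [pvPluralsA, PySem.List.foldl_append_if]
  simp only [List.nil_append, List.mem_map, List.mem_filter]
  constructor
  · rintro ⟨y, ⟨hy, hp⟩, rfl⟩
    exact ⟨y, (memT7 terms y).mp hy, hp, rfl⟩
  · rintro ⟨y, hy, hp, rfl⟩
    exact ⟨y, ⟨(memT7 terms y).mpr hy, hp⟩, rfl⟩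

-- ----- B side -----

-- applying an optional replacement
def pvAppO (s : Option (String × String)) (v : String) : String :=
  match s with
  | none => v
  | some pr => PySem.Str.replace v pr.1 pr.2

-- the inner replacement loop of Source B on one assembled pipeline
theorem applyPipe_filterMap (r l s : Option (String × String)) (t : String) :
    (([r, l, s] : List (Option (String × String))).filterMap id).foldl
      (fun v pr => PySem.Str.replace v pr.1 pr.2) t = pvAppO s (pvAppO l (pvAppO r t)) := by
  rcases r with _ | r <;> rcases l with _ | l <;> rcases s with _ | s <;> rfl

-- the pipelines generate exactly the per-term variant set
theorem pipes_gen (t x : String) :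
    (∃ pipe ∈ pvPipes, pipe.foldl (fun v pr => PySem.Str.replace v pr.1 pr.2) t = x)
      ↔ genP pvFt pvGt pvSynB t x := by
  constructor
  · rintro ⟨pipe, hmem, rfl⟩
    simp only [pvPipes, List.mem_flatMap, List.mem_map, List.mem_cons, List.not_mem_nil,
      or_false] at hmem
    obtain ⟨r, hr, l, hl, s, hs, rfl⟩ := hmem
    rw [applyPipe_filterMap]
    have hq : genQ pvFt pvGt t (pvAppO l (pvAppO r t)) := by
      rcases hr with rfl | rfl <;> rcases hl with rfl | rfl <;>
        simp [genQ, pvAppO, pvFt, pvGt]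
    rcases hs with rfl | ⟨pr, hpr, rfl⟩
    · exact Or.inl hq
    · refine Or.inr ⟨pvAppO l (pvAppO r t), hq, ?_⟩
      simp only [pvSynB, List.mem_map]
      exact ⟨pr, hpr, rfl⟩
  · intro hp
    have build : ∀ (r l s : Option (String × String)),
        r ∈ ([none, some ("tumor", "tumour")] : List (Option (String × String))) →
        l ∈ ([none, some ("leukemia", "leukaemia")] : List (Option (String × String))) →
        s ∈ (none :: pvPairs.map some) →
        ∃ pipe ∈ pvPipes, pipe.foldl (fun v pr => PySem.Str.replace v pr.1 pr.2) t = pvAppO s (pvAppO l (pvAppO r t)) := by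
      intro r l s hr hl hs
      refine ⟨([r, l, s] : List (Option (String × String))).filterMap id, ?_, applyPipe_filterMap r l s t⟩
      simp only [pvPipes, List.mem_flatMap, List.mem_map]
      exact ⟨r, hr, l, hl, s, hs, rfl⟩
    rcases hp with hq | ⟨y, hq, hy⟩
    · rcases hq with (rfl | rfl) | rfl | rfl
      · exact build none none none (by simp) (by simp) (by simp)
      · exact build (some ("tumor", "tumour")) none none (by simp) (by simp) (by simp)
      · exact build none (some ("leukemia", "leukaemia")) none (by simp) (by simp) (by simp)
      · exact build (some ("tumor", "tumour")) (some ("leukemia", "leukaemia")) none (by simp) (by simp) (by simp)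
    · simp only [pvSynB, List.mem_map] at hy
      obtain ⟨pr, hpr, rfl⟩ := hy
      have hsm : (some pr) ∈ (none :: pvPairs.map some) := by
        simp only [List.mem_cons, List.mem_map]
        exact Or.inr ⟨pr, hpr, rfl⟩
      rcases hq with (rfl | rfl) | rfl | rfl
      · exact build none none (some pr) (by simp) (by simp) hsm
      · exact build (some ("tumor", "tumour")) none (some pr) (by simp) (by simp) hsm
      · exact build none (some ("leukemia", "leukaemia")) (some pr) (by simp) (by simp) hsm
      · exact build (some ("tumor", "tumour")) (some ("leukemia", "leukaemia")) (some pr) (by simp) (by simp) hsm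

-- the inner fold of B over any pipeline list: membership
theorem mem_foldPipes (ps : List (List (String × String))) (t : String) (acc : PySem.Set String) (x : String) :
    x ∈ ps.foldl (fun out pipe =>
        let v := pipe.foldl (fun v pr => PySem.Str.replace v pr.1 pr.2) t
        let out2 := PySem.Set.add out v
        if (["tumor", "tumour", "neoplasm", "cancer", "oma", "emia"] : List String).any (fun e => PySem.Str.endswith v e) then PySem.Set.add out2 (v ++ "s") else out2) acc
      ↔ x ∈ acc ∨ ∃ pipe ∈ ps,
          (x = pipe.foldl (fun v pr => PySem.Str.replace v pr.1 pr.2) t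
            ∨ (pvPl (pipe.foldl (fun v pr => PySem.Str.replace v pr.1 pr.2) t) = true
                ∧ x = pipe.foldl (fun v pr => PySem.Str.replace v pr.1 pr.2) t ++ "s")) := by
  induction ps generalizing acc with
  | nil => simp
  | cons p tl ih =>
    rw [List.foldl_cons, ih]
    dsimp only
    simp only [pvPl]
    split_ifs with hpl <;>
      simp only [PySem.Set.mem_add, List.mem_cons] <;>
      constructor
    · rintro (((hm | rfl) | rfl) | ⟨pipe, hmem, hcase⟩)
      · exact Or.inl hm
      · exact Or.inr ⟨p, Or.inl rfl, Or.inl rfl⟩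
      · exact Or.inr ⟨p, Or.inl rfl, Or.inr ⟨hpl, rfl⟩⟩
      · exact Or.inr ⟨pipe, Or.inr hmem, hcase⟩
    · rintro (hm | ⟨pipe, (rfl | hmem), hcase⟩)
      · exact Or.inl (Or.inl (Or.inl hm))
      · rcases hcase with rfl | ⟨_, rfl⟩
        · exact Or.inl (Or.inl (Or.inr rfl))
        · exact Or.inl (Or.inr rfl)
      · exact Or.inr ⟨pipe, hmem, hcase⟩
    · rintro ((hm | rfl) | ⟨pipe, hmem, hcase⟩)
      · exact Or.inl hm
      · exact Or.inr ⟨p, Or.inl rfl, Or.inl rfl⟩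
      · exact Or.inr ⟨pipe, Or.inr hmem, hcase⟩
    · rintro (hm | ⟨pipe, (rfl | hmem), hcase⟩)
      · exact Or.inl (Or.inl hm)
      · rcases hcase with rfl | ⟨hpl2, rfl⟩
        · exact Or.inl (Or.inr rfl)
        · exact absurd hpl2 hpl
      · exact Or.inr ⟨pipe, hmem, hcase⟩

-- B's outer loop, as a named definition equal to the port's fold
def pvBOut (terms : List String) : PySem.Set String :=
  terms.foldl (fun out t0 =>
    let t := PySem.Str.lower t0
    if (decide (3 < PySem.Str.len t) || PySem.Set.contains (PySem.Set.ofList ["gbm", "aml", "crc", "hcc", "cll"]) t)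
        && !(([",", ";", "(", ")", "[", "]", "{", "}"] : List String).any (fun p => PySem.Str.isIn p t))
        && !(PySem.Str.startswith t "of ") then
      pvPipes.foldl (fun out pipe =>
        let v := pipe.foldl (fun v pr => PySem.Str.replace v pr.1 pr.2) t
        let out2 := PySem.Set.add out v
        if (["tumor", "tumour", "neoplasm", "cancer", "oma", "emia"] : List String).any (fun e => PySem.Str.endswith v e) then PySem.Set.add out2 (v ++ "s") else out2) out
    else out) PySem.Set.empty

-- what one kept term contributes, phrased via genP
def pvContrib (t x : String) : Prop :=
  genP pvFt pvGt pvSynB t x ∨ ∃ y, genP pvFt pvGt pvSynB t y ∧ pvPl y = true ∧ x = y ++ "s"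

theorem contrib_iff (t x : String) :
    (∃ pipe ∈ pvPipes,
        (x = pipe.foldl (fun v pr => PySem.Str.replace v pr.1 pr.2) t
          ∨ (pvPl (pipe.foldl (fun v pr => PySem.Str.replace v pr.1 pr.2) t) = true
              ∧ x = pipe.foldl (fun v pr => PySem.Str.replace v pr.1 pr.2) t ++ "s"))) ↔ pvContrib t x := by
  unfold pvContrib
  constructor
  · rintro ⟨pipe, hmem, rfl | ⟨hpl, rfl⟩⟩
    · exact Or.inl ((pipes_gen t _).mp ⟨pipe, hmem, rfl⟩)
    · exact Or.inr ⟨_, (pipes_gen t _).mp ⟨pipe, hmem, rfl⟩, hpl, rfl⟩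
  · rintro (hg | ⟨y, hg, hpl, rfl⟩)
    · obtain ⟨pipe, hmem, hv⟩ := (pipes_gen t x).mpr hg
      exact ⟨pipe, hmem, Or.inl hv.symm⟩
    · obtain ⟨pipe, hmem, hv⟩ := (pipes_gen t y).mpr hg
      exact ⟨pipe, hmem, Or.inr ⟨hv ▸ hpl, by rw [hv]⟩⟩

theorem mem_pvBOut (terms : List String) (x : String) :
    x ∈ pvBOut terms ↔ ∃ t0 ∈ terms, pvKeep (PySem.Str.lower t0) = true ∧ pvContrib (PySem.Str.lower t0) x := by
  have gen : ∀ (ts : List String) (acc : PySem.Set String), x ∈ ts.foldl (fun out t0 =>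
      let t := PySem.Str.lower t0
      if (decide (3 < PySem.Str.len t) || PySem.Set.contains (PySem.Set.ofList ["gbm", "aml", "crc", "hcc", "cll"]) t)
          && !(([",", ";", "(", ")", "[", "]", "{", "}"] : List String).any (fun p => PySem.Str.isIn p t))
          && !(PySem.Str.startswith t "of ") then
        pvPipes.foldl (fun out pipe =>
          let v := pipe.foldl (fun v pr => PySem.Str.replace v pr.1 pr.2) t
          let out2 := PySem.Set.add out v
          if (["tumor", "tumour", "neoplasm", "cancer", "oma", "emia"] : List String).any (fun e => PySem.Str.endswith v e) then PySem.Set.add out2 (v ++ "s") else out2) out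
      else out) acc
      ↔ x ∈ acc ∨ ∃ t0 ∈ ts, pvKeep (PySem.Str.lower t0) = true ∧ pvContrib (PySem.Str.lower t0) x := by
    intro ts
    induction ts with
    | nil => simp
    | cons h tl ih =>
      intro acc
      rw [List.foldl_cons, ih]
      dsimp only
      simp only [List.mem_cons]
      by_cases hk : pvKeep (PySem.Str.lower h) = true
      · have hk' := hk
        unfold pvKeep at hk'
        rw [hk', if_pos rfl, mem_foldPipes, contrib_iff]
        constructor
        · rintro ((hm | hc) | ⟨t0, ht0, hkk, hcc⟩)
          · exact Or.inl hm
          · exact Or.inr ⟨h, Or.inl rfl, hk, hc⟩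
          · exact Or.inr ⟨t0, Or.inr ht0, hkk, hcc⟩
        · rintro (hm | ⟨t0, (rfl | ht0), hkk, hcc⟩)
          · exact Or.inl (Or.inl hm)
          · exact Or.inl (Or.inr hcc)
          · exact Or.inr ⟨t0, ht0, hkk, hcc⟩
      · have hk' : ((decide (3 < PySem.Str.len (PySem.Str.lower h)) || PySem.Set.contains (PySem.Set.ofList ["gbm", "aml", "crc", "hcc", "cll"]) (PySem.Str.lower h))
            && !(([",", ";", "(", ")", "[", "]", "{", "}"] : List String).any (fun p => PySem.Str.isIn p (PySem.Str.lower h)))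
            && !(PySem.Str.startswith (PySem.Str.lower h) "of ")) = false := by
          unfold pvKeep at hk
          simpa using hk
        rw [hk', if_neg (by simp)]
        constructor
        · rintro (hm | ⟨t0, ht0, hkk, hcc⟩)
          · exact Or.inl hm
          · exact Or.inr ⟨t0, Or.inr ht0, hkk, hcc⟩
        · rintro (hm | ⟨t0, (rfl | ht0), hkk, hcc⟩)
          · exact Or.inl hm
          · exact absurd hkk hk
          · exact Or.inr ⟨t0, ht0, hkk, hcc⟩
  unfold pvBOut
  rw [gen terms PySem.Set.empty]
  simp [PySem.Set.empty]

-- B's loop result has no duplicates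
theorem nodup_pvBOut (terms : List String) : (pvBOut terms).Nodup := by
  have inner : ∀ (ps : List (List (String × String))) (t : String) (acc : PySem.Set String), acc.Nodup →
      (ps.foldl (fun out pipe =>
        let v := pipe.foldl (fun v pr => PySem.Str.replace v pr.1 pr.2) t
        let out2 := PySem.Set.add out v
        if (["tumor", "tumour", "neoplasm", "cancer", "oma", "emia"] : List String).any (fun e => PySem.Str.endswith v e) then PySem.Set.add out2 (v ++ "s") else out2) acc).Nodup := by
    intro ps t
    induction ps with
    | nil => intro acc h; simpa using h
    | cons p tl ih =>
      intro acc h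
      rw [List.foldl_cons]
      apply ih
      dsimp only
      split_ifs
      · exact PySem.Set.nodup_add _ _ (PySem.Set.nodup_add _ _ h)
      · exact PySem.Set.nodup_add _ _ h
  unfold pvBOut
  generalize hacc : PySem.Set.empty = acc
  have hnd : (acc : PySem.Set String).Nodup := by rw [← hacc]; exact List.nodup_nil
  clear hacc
  induction terms generalizing acc with
  | nil => simpa using hnd
  | cons h tl ih =>
    rw [List.foldl_cons]
    apply ih
    dsimp only
    split_ifs with hg
    · exact inner pvPipes (PySem.Str.lower h) acc hnd
    · exact hnd

theorem port_eq (terms : List String) : augmentTermList terms = augmentTermList_alt terms := by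
  show PySem.List.sorted (PySem.Set.ofList (pvT7 terms ++ pvPluralsA terms)) (fun x => x) false
      = PySem.List.sorted (pvBOut terms) (fun x => x) false
  apply PySem.List.sorted_eq_sorted_of_perm _ _ _ (fun a b hab => hab)
  rw [List.perm_ext_iff_of_nodup (PySem.Set.nodup_ofList _) (nodup_pvBOut terms)]
  intro a
  rw [PySem.Set.mem_ofList, List.mem_append, memT7, memPlA, mem_pvBOut]
  unfold pvContrib
  constructor
  · rintro (⟨t0, ht0, hk, hg⟩ | ⟨y, ⟨t0, ht0, hk, hg⟩, hpl, rfl⟩)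
    · exact ⟨t0, ht0, hk, Or.inl hg⟩
    · exact ⟨t0, ht0, hk, Or.inr ⟨y, hg, hpl, rfl⟩⟩
  · rintro ⟨t0, ht0, hk, (hg | ⟨y, hg, hpl, rfl⟩)⟩
    · exact Or.inl ⟨t0, ht0, hk, hg⟩
    · exact Or.inr ⟨y, ⟨t0, ht0, hk, hg⟩, hpl, rfl⟩

-- ===== VERDICT (by name: the statement is the Claim_ definition above) =====
theorem augmentTermList_spec : Claim_equal_augmentTermList := by
  intro terms _
  exact port_eq terms
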